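-- pv_equiv track=rewrite | github.com/EdwardBetts/osm-wikidata | matcher/matcher.py | prefer_key_over_building
-- ===== SOURCE A (Python) =====
-- def prefer_key_over_building(candidates, key):
--     if len(candidates) == 1:
--         return candidates
--
--     best_match = None
--     for c in candidates:
--         mt = c["matching_tags"]
--         if any(tag.startswith(key + "=") for tag in mt):
--             if best_match:
--                 return candidates
--             best_match = c
--             continue
--
--         if len(mt) != 1 or not list(mt)[0].startswith("building"):
--             return candidates
--
--     return [best_match] if best_match else candidates
-- ===== SOURCE B (Python) =====
-- def prefer_key_over_building(candidates, key):
--     if len(candidates) == 1: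
--         return candidates
--     prefix = key + "="
--     def key_match(c):
--         return any(t.startswith(prefix) for t in c["matching_tags"])
--     key_matches = [c for c in candidates if key_match(c)]
--     if len(key_matches) != 1:
--         return candidates
--     building_only = all(
--         len(c["matching_tags"]) == 1
--         and next(iter(c["matching_tags"])).startswith("building")
--         for c in candidates if not key_match(c))
--     return key_matches if building_only else candidates
-- ===== Notes on version B (the rewrite author's own statement) =====
-- stated objective: simpler
-- what changed: Replaces A's single stateful scan (best_match accumulator with three early returns) by a declarative decomposition: filter the key-matching candidates once, and only if exactly one exists check that all remaining candidates are building-only.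
import Mathlib
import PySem

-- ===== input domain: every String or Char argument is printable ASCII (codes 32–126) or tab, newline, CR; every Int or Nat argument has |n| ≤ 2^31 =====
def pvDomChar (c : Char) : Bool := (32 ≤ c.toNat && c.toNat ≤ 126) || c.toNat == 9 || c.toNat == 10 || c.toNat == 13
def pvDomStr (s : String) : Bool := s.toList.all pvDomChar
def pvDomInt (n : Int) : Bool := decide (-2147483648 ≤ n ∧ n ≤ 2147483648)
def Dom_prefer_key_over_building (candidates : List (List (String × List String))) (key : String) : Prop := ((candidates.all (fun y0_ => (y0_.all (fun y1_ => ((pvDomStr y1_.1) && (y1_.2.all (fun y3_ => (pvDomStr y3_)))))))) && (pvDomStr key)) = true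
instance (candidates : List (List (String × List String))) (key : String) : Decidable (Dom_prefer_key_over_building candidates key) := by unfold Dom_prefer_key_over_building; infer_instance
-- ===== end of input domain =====

-- B re-decomposes A's stateful scan as filter-the-key-matches + all-others-building-only (simpler
-- decomposition, same cost); equivalence is on the return value; inputs where B's eager comprehension
-- hits a KeyError that A's early return avoided are outside Pre_.

-- ===== PORT A =====
-- loop of A: state = remaining candidates + best_match (Option); each dict lookup c["matching_tags"]
-- is assoc-list first-match lookup (List.lookup); a missing key (KeyError) is outside Pre_, the port
-- returns candidates there.  'if best_match:' is Python truthiness of a dict: b ≠ [].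
-- 'len(mt) != 1 or not list(mt)[0].startswith("building")': the [0] is only reached when len(mt) == 1
-- (Python short-circuit), so the total 'mt.headD ""' reads the same element there.
def pkbGo (candidates : List (List (String × List String))) (key : String) :
    List (List (String × List String)) → Option (List (String × List String)) →
    List (List (String × List String))
  | [], best =>
      match best with
      | some b => if b ≠ [] then [b] else candidates
      | none => candidates
  | c :: rest, best =>
      match List.lookup "matching_tags" c with
      | none => candidates   -- KeyError in Python; excluded by Pre_
      | some mt =>
        if mt.any (fun tag => PySem.Str.startswith tag (key ++ "=")) then
          match best with
          | some b => if b ≠ [] then candidates else pkbGo candidates key rest (some c)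
          | none => pkbGo candidates key rest (some c)
        else
          if mt.length ≠ 1 ∨ PySem.Str.startswith (mt.headD "") "building" = false then candidates
          else pkbGo candidates key rest best

def prefer_key_over_building (candidates : List (List (String × List String))) (key : String) : List (List (String × List String)) :=
  if candidates.length = 1 then candidates
  else pkbGo candidates key candidates none

-- ===== PORT B =====
-- helpers of Source B; under Pre_ every candidate contains "matching_tags", so the total '(… ).getD []'
-- reads exactly the Python c["matching_tags"].
def pkbKeyMatch (pfx : String) (c : List (String × List String)) : Bool :=
  ((List.lookup "matching_tags" c).getD []).any (fun t => PySem.Str.startswith t pfx)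

def pkbBuildingOnly (c : List (String × List String)) : Bool :=
  let mt := (List.lookup "matching_tags" c).getD []
  mt.length == 1 && PySem.Str.startswith (mt.headD "") "building"

def prefer_key_over_building_alt (candidates : List (List (String × List String))) (key : String) : List (List (String × List String)) :=
  if candidates.length = 1 then candidates
  else
    let pfx := key ++ "="
    let km := candidates.filter (pkbKeyMatch pfx)
    if km.length ≠ 1 then candidates
    else if (candidates.filter (fun c => !pkbKeyMatch pfx c)).all pkbBuildingOnly then km
    else candidates

-- ===== PRECONDITION & SPEC =====
-- Pre_ excludes inputs where some candidate dict lacks the key "matching_tags" (unless the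
-- length-1 early return fires): there A may return candidates before reaching the missing key
-- while B's eager comprehension raises KeyError.
def Pre_prefer_key_over_building (candidates : List (List (String × List String))) (key : String) : Prop :=
  candidates.length = 1 ∨ ∀ c ∈ candidates, (List.lookup "matching_tags" c).isSome
instance (candidates : List (List (String × List String))) (key : String) : Decidable (Pre_prefer_key_over_building candidates key) := by unfold Pre_prefer_key_over_building; infer_instance

def pvWitness_prefer_key_over_building : (List (List (String × List String))) × String :=
  ([[("matching_tags", ["k=1"])], [("matching_tags", ["building"])]], "k")

def Spec_prefer_key_over_building (candidates : List (List (String × List String))) (key : String) (out : List (List (String × List String))) : Prop := out = prefer_key_over_building_alt candidates key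
instance (candidates : List (List (String × List String))) (key : String) (out : List (List (String × List String))) : Decidable (Spec_prefer_key_over_building candidates key out) := by unfold Spec_prefer_key_over_building; infer_instance

-- ===== CLAIM (what is proved, stated in full; the proofs are below) =====
def Claim_equal_prefer_key_over_building : Prop := ∀ (candidates : List (List (String × List String))) (key : String), Dom_prefer_key_over_building candidates key → Pre_prefer_key_over_building candidates key → Spec_prefer_key_over_building candidates key (prefer_key_over_building candidates key)

-- ===== LEMMAS AND PROOFS =====

-- Once best_match is set (to a nonempty dict b), A's scan returns [b] iff no further key match
-- exists and every remaining non-key candidate is building-only; otherwise candidates.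
theorem pkbGo_some (cands : List (List (String × List String))) (key : String)
    (rest : List (List (String × List String))) (b : List (String × List String))
    (h : ∀ c ∈ rest, (List.lookup "matching_tags" c).isSome) (hb : b ≠ []) :
    pkbGo cands key rest (some b) =
      if rest.filter (pkbKeyMatch (key ++ "=")) = [] ∧
         (rest.filter (fun c => !pkbKeyMatch (key ++ "=") c)).all pkbBuildingOnly
      then [b] else cands := by
  induction rest with
  | nil => simp [pkbGo, hb]
  | cons c rest ih =>
    obtain ⟨mt, hmt⟩ := Option.isSome_iff_exists.mp (h c (by simp))
    have h' : ∀ x ∈ rest, (List.lookup "matching_tags" x).isSome := fun x hx => h x (by simp [hx])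
    have hK : pkbKeyMatch (key ++ "=") c = mt.any (fun t => PySem.Str.startswith t (key ++ "=")) := by
      simp [pkbKeyMatch, hmt]
    have hB : pkbBuildingOnly c =
        (mt.length == 1 && PySem.Str.startswith (mt.headD "") "building") := by
      simp [pkbBuildingOnly, hmt]
    simp only [pkbGo, hmt]
    cases hk : pkbKeyMatch (key ++ "=") c with
    | true =>
      rw [if_pos (hK ▸ hk), if_pos hb]
      simp [List.filter_cons, hk]
    | false =>
      have hka : mt.any (fun t => PySem.Str.startswith t (key ++ "=")) = false := hK ▸ hk
      rw [if_neg (by simpa using hka)]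
      cases hbo : pkbBuildingOnly c with
      | false =>
        have hBf := hB ▸ hbo
        rcases Bool.and_eq_false_iff.mp hBf with h1 | h2
        · rw [if_pos (Or.inl (by simpa using h1))]
          simp [List.filter_cons, hk, hbo]
        · rw [if_pos (Or.inr h2)]
          simp [List.filter_cons, hk, hbo]
      | true =>
        have hBt := hB ▸ hbo
        have h1 : mt.length = 1 := by simpa using (Bool.and_eq_true_iff.mp hBt).1
        have h2 := (Bool.and_eq_true_iff.mp hBt).2
        rw [if_neg (by push_neg; exact ⟨h1, by simpa using h2⟩)]
        rw [ih h']
        simp [List.filter_cons, hk, hbo]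

-- Starting with no best_match, A's scan returns [m] when m is the unique key match and all
-- non-key candidates are building-only; otherwise candidates.
theorem pkbGo_none (cands : List (List (String × List String))) (key : String)
    (rest : List (List (String × List String)))
    (h : ∀ c ∈ rest, (List.lookup "matching_tags" c).isSome) :
    pkbGo cands key rest none =
      match rest.filter (pkbKeyMatch (key ++ "=")) with
      | [m] => if (rest.filter (fun c => !pkbKeyMatch (key ++ "=") c)).all pkbBuildingOnly
               then [m] else cands
      | _ => cands := by
  induction rest with
  | nil => simp [pkbGo]
  | cons c rest ih =>
    obtain ⟨mt, hmt⟩ := Option.isSome_iff_exists.mp (h c (by simp))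
    have hcne : c ≠ [] := by
      intro hc; rw [hc] at hmt; simp [List.lookup] at hmt
    have h' : ∀ x ∈ rest, (List.lookup "matching_tags" x).isSome := fun x hx => h x (by simp [hx])
    have hK : pkbKeyMatch (key ++ "=") c = mt.any (fun t => PySem.Str.startswith t (key ++ "=")) := by
      simp [pkbKeyMatch, hmt]
    have hB : pkbBuildingOnly c =
        (mt.length == 1 && PySem.Str.startswith (mt.headD "") "building") := by
      simp [pkbBuildingOnly, hmt]
    simp only [pkbGo, hmt]
    cases hk : pkbKeyMatch (key ++ "=") c with
    | true =>
      rw [if_pos (hK ▸ hk)]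
      rw [pkbGo_some cands key rest c h' hcne]
      cases hrest : rest.filter (pkbKeyMatch (key ++ "=")) with
      | nil => simp [List.filter_cons, hk, hrest]
      | cons a t => simp [List.filter_cons, hk, hrest]
    | false =>
      have hka : mt.any (fun t => PySem.Str.startswith t (key ++ "=")) = false := hK ▸ hk
      rw [if_neg (by simpa using hka)]
      cases hbo : pkbBuildingOnly c with
      | false =>
        have hBf := hB ▸ hbo
        have hA : ¬mt.length = 1 ∨ PySem.Str.startswith (mt.headD "") "building" = false := by
          rcases Bool.and_eq_false_iff.mp hBf with h1 | h2
          · exact Or.inl (by simpa using h1)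
          · exact Or.inr h2
        rw [if_pos hA]
        cases hx : rest.filter (pkbKeyMatch (key ++ "=")) with
        | nil => simp [List.filter_cons, hk, hx, hbo]
        | cons a t => cases t <;> simp [List.filter_cons, hk, hx, hbo]
      | true =>
        have hBt := hB ▸ hbo
        have h1 : mt.length = 1 := by simpa using (Bool.and_eq_true_iff.mp hBt).1
        have h2 := (Bool.and_eq_true_iff.mp hBt).2
        rw [if_neg (by push_neg; exact ⟨h1, by simpa using h2⟩)]
        rw [ih h']
        cases hx : rest.filter (pkbKeyMatch (key ++ "=")) with
        | nil => simp [List.filter_cons, hk, hx, hbo]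
        | cons a t => cases t <;> simp [List.filter_cons, hk, hx, hbo]

-- ===== VERDICT (by name: the statement is the Claim_ definition above) =====
theorem prefer_key_over_building_spec : Claim_equal_prefer_key_over_building := by
  intro candidates key _hdom hpre
  unfold Spec_prefer_key_over_building prefer_key_over_building prefer_key_over_building_alt
  by_cases hlen : candidates.length = 1
  · simp [hlen]
  · rcases hpre with h1 | h
    · exact absurd h1 hlen
    rw [if_neg hlen, if_neg hlen]
    rw [pkbGo_none candidates key candidates h]
    cases hx : candidates.filter (pkbKeyMatch (key ++ "=")) with
    | nil => simp [hx]
    | cons a t =>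
      cases t with
      | nil =>
        cases hall : (candidates.filter (fun c => !pkbKeyMatch (key ++ "=") c)).all pkbBuildingOnly with
        | true => simp [hx, hall]
        | false => simp [hx, hall]
      | cons b t' => simp [hx]
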